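-- pv_equiv track=rewrite | github.com/gamdong2/Algorithm | 프로그래머스/1/160586. 대충 만든 자판/대충 만든 자판.py | solution
-- ===== SOURCE A (Python) =====
-- def solution(keymap, targets):
--     min_keypress = {}
--     for i, keys in enumerate(keymap):
--         for j, char in enumerate(keys):
--
--             if char in min_keypress:
--                 min_keypress[char] = min(min_keypress[char], j + 1)
--             else:
--                 min_keypress[char] = j + 1
--     answer = []
--     for target in targets:
--         total_presses = 0
--         for char in target:
--             if char not in min_keypress:
--                 total_presses = -1
--                 break
--             total_presses += min_keypress[char]
--         answer.append(total_presses)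
--
--     return answer
-- ===== SOURCE B (Python) =====
-- def solution(keymap, targets):
--     pairs = [(c, j + 1) for keys in keymap for j, c in enumerate(keys)]
--
--     def press(ch):
--         costs = [p for c, p in pairs if c == ch]
--         return min(costs) if costs else -1
--
--     best = {ch: press(ch) for ch in {c for c, _ in pairs}}
--
--     result = []
--     for t in targets:
--         if any(c not in best for c in t):
--             result.append(-1)
--         else:
--             result.append(sum(best[c] for c in t))
--     return result
-- ===== Notes on version B (the rewrite author's own statement) =====
-- stated objective: alternative
-- what changed: B replaces A's running-min dict build and fused accumulate-and-break target loop by: flattening keymap into a (char, cost) pair list, precomputing each distinct char's cost as a min over that list, then scoring each target with a separate membership check followed by a sum.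
import Mathlib
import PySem

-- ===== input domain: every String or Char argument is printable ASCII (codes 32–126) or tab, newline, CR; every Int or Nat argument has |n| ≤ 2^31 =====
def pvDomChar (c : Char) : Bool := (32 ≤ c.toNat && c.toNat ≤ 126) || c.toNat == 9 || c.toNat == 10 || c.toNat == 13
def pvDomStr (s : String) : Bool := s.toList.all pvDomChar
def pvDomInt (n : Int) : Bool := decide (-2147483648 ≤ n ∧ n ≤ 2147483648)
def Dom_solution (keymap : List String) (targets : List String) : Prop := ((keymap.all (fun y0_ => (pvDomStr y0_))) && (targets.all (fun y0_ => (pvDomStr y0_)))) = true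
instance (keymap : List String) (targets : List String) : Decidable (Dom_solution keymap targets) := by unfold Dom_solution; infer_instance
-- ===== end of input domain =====

-- B removes the dict and the fused accumulate-and-break loop: a flat (char, cost) pair
-- list, a per-char min over it, and check-then-sum per target (objective: alternative).

-- ===== PORT A =====

-- inner loop body: 'if char in min_keypress: … min … else: …' for one (j, char) pair
def stepA (d : PySem.Dict Char Int) (p : Int × Char) : PySem.Dict Char Int :=
  match d.get? p.2 with
  | some v => d.insert p.2 (min v (p.1 + 1))
  | none   => d.insert p.2 (p.1 + 1)

-- the first pass: build min_keypress
def buildA (keymap : List String) : PySem.Dict Char Int :=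
  (PySem.List.enumerate keymap 0).foldl
    (fun d ik => (PySem.List.enumerate ik.2.toList 0).foldl stepA d) PySem.Dict.empty

-- the inner target loop with its break-with-sentinel
def scoreA (d : PySem.Dict Char Int) : List Char → Int → Int
  | [], acc => acc
  | c :: cs, acc =>
    match d.get? c with
    | none => -1
    | some v => scoreA d cs (acc + v)

def solution (keymap : List String) (targets : List String) : List Int :=
  let d := buildA keymap
  targets.foldl (fun answer t => answer ++ [scoreA d t.toList 0]) []

-- ===== PORT B =====

-- pairs = [(c, j + 1) for keys in keymap for j, c in enumerate(keys)]
def pairsB (keymap : List String) : List (Char × Int) :=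
  keymap.flatMap (fun keys => (PySem.List.enumerate keys.toList 0).map (fun jc => (jc.2, jc.1 + 1)))

-- press(ch): min of the matching costs, -1 if there are none
def pressB (pairs : List (Char × Int)) (ch : Char) : Int :=
  let costs := (pairs.filter (fun p => p.1 == ch)).map (fun p => p.2)
  match PySem.List.min? costs (fun x => x) with
  | none => -1
  | some m => m

-- {c for c, _ in pairs}
def distinctB (pairs : List (Char × Int)) : List Char :=
  PySem.Set.ofList (pairs.map (fun p => p.1))

-- best = {ch: press(ch) for ch in {c for c, _ in pairs}}
def bestB (pairs : List (Char × Int)) : PySem.Dict Char Int :=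
  (distinctB pairs).foldl (fun d ch => d.insert ch (pressB pairs ch)) PySem.Dict.empty

def solution_alt (keymap : List String) (targets : List String) : List Int :=
  let best := bestB (pairsB keymap)
  targets.map (fun t =>
    if t.toList.any (fun c => !(best.contains c)) then -1
    else (t.toList.map (fun c => best.getD c 0)).sum)

-- ===== PRECONDITION & SPEC =====
def Spec_solution (keymap : List String) (targets : List String) (out : List Int) : Prop := out = solution_alt keymap targets
instance (keymap : List String) (targets : List String) (out : List Int) : Decidable (Spec_solution keymap targets out) := by unfold Spec_solution; infer_instance

-- ===== CLAIM (what is proved, stated in full; the proofs are below) =====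
def Claim_equal_solution : Prop := ∀ (keymap : List String) (targets : List String), Dom_solution keymap targets → Spec_solution keymap targets (solution keymap targets)

-- ===== LEMMAS AND PROOFS =====

-- the minimum of a nonempty cost list, as an Option
def mfoList : List Int → Option Int
  | [] => none
  | x :: t => some (t.foldl min x)

def optMin : Option Int → Option Int → Option Int
  | none, o => o
  | o, none => o
  | some a, some b => some (min a b)

theorem optMin_none_left (o : Option Int) : optMin none o = o := rfl

theorem optMin_none_right (o : Option Int) : optMin o none = o := by
  cases o <;> rfl

theorem foldl_min_pull (t : List Int) (a b : Int) :
    t.foldl min (min a b) = min a (t.foldl min b) := by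
  induction t generalizing b with
  | nil => rfl
  | cons x t ih =>
    simp only [List.foldl]
    rw [min_assoc, ih]

theorem mfoList_cons (a : Int) (l : List Int) :
    mfoList (a :: l) = optMin (some a) (mfoList l) := by
  cases l with
  | nil => rfl
  | cons x t =>
    simp only [mfoList, optMin, List.foldl]
    rw [foldl_min_pull]

-- the per-char minimum B computes over a pair list
def mfo (ps : List (Char × Int)) (c : Char) : Option Int :=
  mfoList ((ps.filter (fun p => p.1 == c)).map (fun p => p.2))

theorem mfo_cons (q : Char × Int) (ps : List (Char × Int)) (c : Char) :
    mfo (q :: ps) c = if q.1 = c then optMin (some q.2) (mfo ps c) else mfo ps c := by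
  simp only [mfo, List.filter_cons]
  by_cases h : q.1 = c
  · simp [h, mfoList_cons]
  · simp [h]

-- step' is stepA re-keyed on the transformed pair
def step' (d : PySem.Dict Char Int) (q : Char × Int) : PySem.Dict Char Int :=
  match d.get? q.1 with
  | some v => d.insert q.1 (min v q.2)
  | none   => d.insert q.1 q.2

theorem step'_get? (d : PySem.Dict Char Int) (q : Char × Int) (c : Char) :
    (step' d q).get? c =
      if q.1 = c then optMin (d.get? q.1) (some q.2) else d.get? c := by
  unfold step'
  cases hd : d.get? q.1 with
  | none =>
    rw [PySem.Dict.get?_insert]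
    by_cases h : q.1 = c
    · simp [h, ← hd, optMin]
    · simp [h, Ne.symm h]
  | some v =>
    rw [PySem.Dict.get?_insert]
    by_cases h : q.1 = c
    · simp [h, ← hd, optMin]
    · simp [h, Ne.symm h]

theorem optMin_assoc (a b c : Option Int) : optMin (optMin a b) c = optMin a (optMin b c) := by
  cases a <;> cases b <;> cases c <;> simp [optMin, min_assoc]

-- the dict after folding step' over a pair list, characterised by mfo
theorem foldl_step'_get? (ps : List (Char × Int)) (d : PySem.Dict Char Int) (c : Char) :
    (ps.foldl step' d).get? c = optMin (d.get? c) (mfo ps c) := by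
  induction ps generalizing d with
  | nil => simp [mfo, mfoList, optMin_none_right]
  | cons q ps ih =>
    simp only [List.foldl]
    rw [ih, step'_get?, mfo_cons]
    by_cases h : q.1 = c
    · subst h
      rw [if_pos rfl, if_pos rfl, ← optMin_assoc]
    · simp [h]

-- buildA folds exactly step' over pairsB
theorem buildA_eq (keymap : List String) :
    buildA keymap = (pairsB keymap).foldl step' PySem.Dict.empty := by
  unfold buildA pairsB
  rw [List.foldl_flatMap]
  have h : ∀ (xs : List String) (s : Int) (d : PySem.Dict Char Int),
      (PySem.List.enumerate xs s).foldl
        (fun d ik => (PySem.List.enumerate ik.2.toList 0).foldl stepA d) d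
      = xs.foldl (fun d keys =>
          ((PySem.List.enumerate keys.toList 0).map (fun jc => (jc.2, jc.1 + 1))).foldl step' d) d := by
    intro xs
    induction xs with
    | nil => intro s d; rfl
    | cons x xs ih =>
      intro s d
      rw [PySem.List.enumerate_cons]
      simp only [List.foldl]
      rw [ih]
      congr 1
      rw [List.foldl_map]
      rfl
  exact h keymap 0 PySem.Dict.empty

theorem buildA_get? (keymap : List String) (c : Char) :
    (buildA keymap).get? c = mfo (pairsB keymap) c := by
  rw [buildA_eq, foldl_step'_get?, PySem.Dict.get?_empty, optMin_none_left]

-- every cost in pairsB is j + 1 ≥ 1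
theorem pairsB_pos (keymap : List String) : ∀ p ∈ pairsB keymap, 1 ≤ p.2 := by
  intro p hp
  simp only [pairsB, List.mem_flatMap, List.mem_map] at hp
  obtain ⟨keys, -, jc, hjc, rfl⟩ := hp
  rw [PySem.List.mem_enumerate_iff] at hjc
  obtain ⟨k, hk, rfl⟩ := hjc
  simp only [zero_add]
  omega

theorem mfoList_pos (l : List Int) (hl : ∀ x ∈ l, 1 ≤ x) (m : Int)
    (hm : mfoList l = some m) : 1 ≤ m := by
  cases l with
  | nil => simp [mfoList] at hm
  | cons x t =>
    simp only [mfoList, Option.some.injEq] at hm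
    subst hm
    have : ∀ (t : List Int) (a : Int), 1 ≤ a → (∀ x ∈ t, 1 ≤ x) → 1 ≤ t.foldl min a := by
      intro t
      induction t with
      | nil => intro a ha _; exact ha
      | cons y t ih =>
        intro a ha hall
        simp only [List.foldl]
        exact ih _ (le_min ha (hall y (by simp))) (fun x hx => hall x (by simp [hx]))
    exact this t x (hl x (by simp)) (fun x hx => hl x (by simp [hx]))

-- pressB, characterised by mfo
theorem pressB_eq (pairs : List (Char × Int)) (ch : Char) :
    pressB pairs ch = match mfo pairs ch with | none => -1 | some m => m := by
  unfold pressB mfo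
  cases h : (pairs.filter (fun p => p.1 == ch)).map (fun p => p.2) with
  | nil => simp [mfoList, PySem.List.min?]
  | cons x t => simp [PySem.List.min?_id_cons, mfoList]


theorem pressB_ne_neg_one_of_some (keymap : List String) (ch : Char) (m : Int)
    (hm : mfo (pairsB keymap) ch = some m) : 1 ≤ m := by
  apply mfoList_pos _ _ m hm
  intro x hx
  simp only [List.mem_map, List.mem_filter] at hx
  obtain ⟨p, ⟨hp, -⟩, rfl⟩ := hx
  exact pairsB_pos keymap p hp

-- per-target: the fused loop of A equals B's check-then-sum
theorem scoreA_eq (keymap : List String) (cs : List Char) (acc : Int) :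
    scoreA (buildA keymap) cs acc =
      (if (cs.map (pressB (pairsB keymap))).contains (-1) then -1
       else acc + (cs.map (pressB (pairsB keymap))).sum) := by
  induction cs generalizing acc with
  | nil => simp [scoreA]
  | cons c cs ih =>
    simp only [scoreA, List.map_cons, List.contains_cons, List.sum_cons]
    rw [buildA_get?]
    cases h : mfo (pairsB keymap) c with
    | none =>
      have hp : pressB (pairsB keymap) c = -1 := by rw [pressB_eq, h]
      simp [hp]
    | some v =>
      have hp : pressB (pairsB keymap) c = v := by rw [pressB_eq, h]
      have hv : 1 ≤ v := pressB_ne_neg_one_of_some keymap c v h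
      have hne : ((-1 : Int) == v) = false := by simp; omega
      simp only [ih, hp, hne, Bool.false_or]
      split
      · rfl
      · ring

-- the memo dict of B, characterised
theorem foldl_insert_get? (f : Char → Int) (l : List Char) (d : PySem.Dict Char Int) (x : Char) :
    (l.foldl (fun d ch => d.insert ch (f ch)) d).get? x =
      if x ∈ l then some (f x) else d.get? x := by
  induction l generalizing d with
  | nil => simp
  | cons c l ih =>
    simp only [List.foldl, List.mem_cons]
    rw [ih, PySem.Dict.get?_insert]
    by_cases hx : x ∈ l
    · simp [hx]
    · by_cases hc : x = c <;> simp [hx, hc]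

theorem mem_distinctB_iff (pairs : List (Char × Int)) (c : Char) :
    c ∈ distinctB pairs ↔ mfo pairs c ≠ none := by
  unfold distinctB mfo
  rw [PySem.Set.mem_ofList]
  constructor
  · intro h hn
    simp only [List.mem_map] at h
    obtain ⟨p, hp, rfl⟩ := h
    cases hl : (pairs.filter (fun q => q.1 == p.1)).map (fun q => q.2) with
    | nil =>
      rw [List.map_eq_nil_iff, List.filter_eq_nil_iff] at hl
      exact hl p hp (by simp)
    | cons x t => rw [hl] at hn; simp [mfoList] at hn
  · intro hn
    cases hl : (pairs.filter (fun q => q.1 == c)).map (fun q => q.2) with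
    | nil => rw [hl] at hn; simp [mfoList] at hn
    | cons x t =>
      have : ∃ q ∈ pairs.filter (fun q => q.1 == c), True := by
        cases hf : pairs.filter (fun q => q.1 == c) with
        | nil => rw [hf] at hl; simp at hl
        | cons q qs => exact ⟨q, by simp, trivial⟩
      obtain ⟨q, hq, -⟩ := this
      rw [List.mem_filter] at hq
      exact List.mem_map.mpr ⟨q, hq.1, by simpa using hq.2⟩

theorem bestB_get? (pairs : List (Char × Int)) (c : Char) :
    (bestB pairs).get? c = if mfo pairs c = none then none else some (pressB pairs c) := by
  unfold bestB
  rw [foldl_insert_get?, PySem.Dict.get?_empty]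
  by_cases h : c ∈ distinctB pairs
  · rw [if_pos h, if_neg ((mem_distinctB_iff pairs c).mp h)]
  · rw [if_neg h, if_pos (by by_contra hn; exact h ((mem_distinctB_iff pairs c).mpr hn))]

-- bridging getD/contains to mfo on the memo dict
theorem bestB_contains (pairs : List (Char × Int)) (c : Char) :
    (bestB pairs).contains c = false ↔ mfo pairs c = none := by
  rw [← PySem.Dict.get?_eq_none_iff_contains, bestB_get?]
  by_cases h : mfo pairs c = none <;> simp [h]

theorem pressB_eq_neg_one_iff (keymap : List String) (c : Char) :
    pressB (pairsB keymap) c = -1 ↔ mfo (pairsB keymap) c = none := by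
  constructor
  · intro hpc
    cases hmm : mfo (pairsB keymap) c with
    | none => rfl
    | some v =>
      have h1 := pressB_ne_neg_one_of_some keymap c v hmm
      simp only [pressB_eq, hmm] at hpc
      omega
  · intro hn; rw [pressB_eq, hn]

-- ===== VERDICT (by name: the statement is the Claim_ definition above) =====
theorem solution_spec : Claim_equal_solution := by
  intro keymap targets _
  show solution keymap targets = solution_alt keymap targets
  unfold solution solution_alt
  rw [PySem.List.foldl_append_singleton_eq_map]
  simp only [List.nil_append]
  apply List.map_congr_left
  intro t _
  rw [scoreA_eq]
  have hiff : ((t.toList.map (pressB (pairsB keymap))).contains (-1) = true) ↔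
      ((t.toList.any fun c => !(bestB (pairsB keymap)).contains c) = true) := by
    simp only [List.contains_eq_mem, List.mem_map, decide_eq_true_eq, List.any_eq_true,
      Bool.not_eq_true']
    constructor
    · rintro ⟨c, hc, hpc⟩
      exact ⟨c, hc, (bestB_contains _ c).mpr ((pressB_eq_neg_one_iff keymap c).mp hpc)⟩
    · rintro ⟨c, hc, hcc⟩
      exact ⟨c, hc, (pressB_eq_neg_one_iff keymap c).mpr ((bestB_contains _ c).mp hcc)⟩
  by_cases h : (t.toList.map (pressB (pairsB keymap))).contains (-1)
  · rw [if_pos h, if_pos (hiff.mp h)]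
  · rw [if_neg h, if_neg (fun hh => h (hiff.mpr hh)), zero_add]
    congr 1
    apply List.map_congr_left
    intro c hc
    have hm : mfo (pairsB keymap) c ≠ none := by
      intro hn
      apply h
      simp only [List.contains_eq_mem, List.mem_map, decide_eq_true_eq]
      exact ⟨c, hc, (pressB_eq_neg_one_iff keymap c).mpr hn⟩
    have hg : (bestB (pairsB keymap)).get? c = some (pressB (pairsB keymap) c) := by
      rw [bestB_get?, if_neg hm]
    simp [PySem.Dict.getD, hg]
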